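-- pv_equiv track=rewrite | github.com/rootsergio/autocreate_dns_zones_files | main.py | get_zones_and_hosts_from_db_data
-- ===== SOURCE A (Python) =====
-- def get_zones_and_hosts_from_db_data(data: list) -> dict:
--     """
--     Формируем словарь вида {zone: {hostname1: ip_address1, hostname2: ipaddress2}, ...}
--     :return: Словарь с данными о зонах, именах и адресах
--     """
--     zones = dict()
--     for domen, ip in data:
--         zone = domen.split(".")[-2:]
--         zone = ".".join(zone)
--         if zone in zones.keys():
--             zones[zone].update({domen: ip})
--         else:
--             zones[zone] = {domen: ip}
--     sorted(zones)
--     return zones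
-- ===== SOURCE B (Python) =====
-- def get_zones_and_hosts_from_db_data(data: list) -> dict:
--     """
--     Формируем словарь вида {zone: {hostname1: ip_address1, ...}, ...}
--     Alternative decomposition: key each pair by its zone, take zones in first-occurrence
--     order, and build each zone's inner dict by a comprehension over its own pairs.
--     """
--     keyed = [('.'.join(d.split('.')[-2:]), d, ip) for d, ip in data]
--     order = list(dict.fromkeys(z for z, _, _ in keyed))
--     return {z: {d: ip for zz, d, ip in keyed if zz == z} for z in order}
-- ===== Notes on version B (the rewrite author's own statement) =====
-- stated objective: alternative
-- what changed: Replaces A's single-pass nested-dict accumulation (contains-check + update/insert per row) with a keyed decomposition: map each pair to its zone key, take zones in first-occurrence order via dict.fromkeys, and build each zone's inner dict by a comprehension over that zone's own pairs; the dead sorted() call is omitted.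
import Mathlib
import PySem

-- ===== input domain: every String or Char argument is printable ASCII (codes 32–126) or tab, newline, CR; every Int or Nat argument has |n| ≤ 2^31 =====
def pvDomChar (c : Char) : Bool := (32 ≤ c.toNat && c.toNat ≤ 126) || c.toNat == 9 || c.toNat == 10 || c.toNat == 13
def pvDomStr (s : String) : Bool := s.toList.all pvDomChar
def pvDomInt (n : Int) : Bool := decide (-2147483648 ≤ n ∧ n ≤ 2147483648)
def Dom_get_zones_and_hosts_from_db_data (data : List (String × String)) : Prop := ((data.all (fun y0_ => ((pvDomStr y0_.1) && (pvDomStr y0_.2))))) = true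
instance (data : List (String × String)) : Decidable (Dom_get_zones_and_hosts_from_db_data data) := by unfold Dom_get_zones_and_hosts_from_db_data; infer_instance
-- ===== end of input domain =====

-- B replaces A's on-the-fly nested-dict accumulation by a keyed/first-occurrence-order/per-zone
-- comprehension decomposition (objective: alternative; same return value).

-- zone = ".".join(domen.split(".")[-2:])  (shared derivation; sep "." is nonempty so split? never raises)
def pvZoneKey (domen : String) : String :=
  PySem.Str.join "." (PySem.List.slice ((PySem.Str.split? domen ".").getD []) (some (-2)) none)

-- ===== PORT A =====
-- A's trailing 'sorted(zones)' discards its result and is dead code; the returned dict is the fold.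
def get_zones_and_hosts_from_db_data (data : List (String × String)) : List (String × List (String × String)) :=
  (data.foldl
    (fun zones p =>
      let zone := pvZoneKey p.1
      if zones.contains zone then
        zones.modify zone PySem.Dict.empty (fun inner => inner.update [(p.1, p.2)])
      else
        zones.insert zone (PySem.Dict.ofList [(p.1, p.2)]))
    (PySem.Dict.empty : PySem.Dict String (PySem.Dict String String))).items.map
    (fun q => (q.1, q.2.items))

-- ===== PORT B =====
def get_zones_and_hosts_from_db_data_alt (data : List (String × String)) : List (String × List (String × String)) :=
  let keyed := data.map (fun p => (pvZoneKey p.1, p.1, p.2))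
  let order := PySem.List.dedup (keyed.map (·.1))
  order.map (fun z =>
    (z, ((keyed.filter (fun t => t.1 == z)).foldl
          (fun (d : PySem.Dict String String) t => d.insert t.2.1 t.2.2)
          PySem.Dict.empty).items))

-- ===== PRECONDITION & SPEC =====
def Spec_get_zones_and_hosts_from_db_data (data : List (String × String)) (out : List (String × List (String × String))) : Prop := out = get_zones_and_hosts_from_db_data_alt data
instance (data : List (String × String)) (out : List (String × List (String × String))) : Decidable (Spec_get_zones_and_hosts_from_db_data data out) := by unfold Spec_get_zones_and_hosts_from_db_data; infer_instance

-- ===== CLAIM (what is proved, stated in full; the proofs are below) =====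
def Claim_equal_get_zones_and_hosts_from_db_data : Prop := ∀ (data : List (String × String)), Dom_get_zones_and_hosts_from_db_data data → Spec_get_zones_and_hosts_from_db_data data (get_zones_and_hosts_from_db_data data)

-- ===== LEMMAS AND PROOFS =====

-- A's loop body, rewritten to a single uniform insert (both branches agree with it)
theorem pv_step_eq (zones : PySem.Dict String (PySem.Dict String String)) (p : String × String) :
    (let zone := pvZoneKey p.1
     if zones.contains zone then
       zones.modify zone PySem.Dict.empty (fun inner => inner.update [(p.1, p.2)])
     else
       zones.insert zone (PySem.Dict.ofList [(p.1, p.2)])) =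
    zones.insert (pvZoneKey p.1) ((zones.getD (pvZoneKey p.1) PySem.Dict.empty).insert p.1 p.2) := by
  by_cases h : zones.contains (pvZoneKey p.1) = true
  · simp [h, PySem.Dict.modify, PySem.Dict.update]
  · simp only [Bool.not_eq_true] at h
    simp [h, PySem.Dict.getD_of_not_contains, PySem.Dict.ofList, PySem.Dict.update]

-- the value the uniform fold holds at key z is exactly the inner fold over z's own pairs
theorem pv_getD_fold (z : String) (l : List (String × String))
    (d : PySem.Dict String (PySem.Dict String String)) :
    (l.foldl (fun zs p => zs.insert (pvZoneKey p.1) ((zs.getD (pvZoneKey p.1) PySem.Dict.empty).insert p.1 p.2)) d).getD z PySem.Dict.empty =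
    (l.filter (fun p => pvZoneKey p.1 == z)).foldl (fun d p => d.insert p.1 p.2) (d.getD z PySem.Dict.empty) := by
  induction l generalizing d with
  | nil => rfl
  | cons a l ih =>
    simp only [List.foldl_cons, List.filter_cons]
    by_cases hz : pvZoneKey a.1 = z
    · simp [hz, ih]
    · have : (pvZoneKey a.1 == z) = false := by simp [hz]
      simp [this, ih, PySem.Dict.getD_insert, Ne.symm hz]


-- ===== VERDICT (by name: the statement is the Claim_ definition above) =====
theorem get_zones_and_hosts_from_db_data_spec : Claim_equal_get_zones_and_hosts_from_db_data := by
  intro data _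
  unfold Spec_get_zones_and_hosts_from_db_data
  unfold get_zones_and_hosts_from_db_data get_zones_and_hosts_from_db_data_alt
  -- rewrite A's fold to the uniform insert fold
  rw [show (fun (zones : PySem.Dict String (PySem.Dict String String)) (p : String × String) =>
        let zone := pvZoneKey p.1
        if zones.contains zone then
          zones.modify zone PySem.Dict.empty (fun inner => inner.update [(p.1, p.2)])
        else
          zones.insert zone (PySem.Dict.ofList [(p.1, p.2)])) =
      (fun zs p => zs.insert (pvZoneKey p.1) ((zs.getD (pvZoneKey p.1) PySem.Dict.empty).insert p.1 p.2))
    from funext fun zs => funext fun p => pv_step_eq zs p]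
  set F := data.foldl (fun zs (p : String × String) => zs.insert (pvZoneKey p.1) ((zs.getD (pvZoneKey p.1) PySem.Dict.empty).insert p.1 p.2)) PySem.Dict.empty with hF
  have hnd : F.keys.Nodup := by
    rw [hF]
    exact PySem.Dict.nodup_keys_foldl_insert_key data (fun p => pvZoneKey p.1) _ _ PySem.Dict.nodup_keys_empty
  have hkeys : F.keys = PySem.List.dedup (data.map (fun p => pvZoneKey p.1)) := by
    rw [hF, PySem.Dict.keys_foldl_insert_key]
    simp [PySem.Dict.keys_empty, PySem.Set.update, PySem.List.dedup, PySem.Set.ofList]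
  rw [PySem.Dict.items_eq_map_keys F hnd PySem.Dict.empty, hkeys]
  simp only [List.map_map, List.map_map]
  apply List.map_congr_left
  intro z _
  simp only [Function.comp]
  congr 1
  rw [hF, pv_getD_fold z data PySem.Dict.empty]
  have hfilter : (data.map (fun p => (pvZoneKey p.1, p.1, p.2))).filter (fun t => t.1 == z) =
      (data.filter (fun p => pvZoneKey p.1 == z)).map (fun p => (pvZoneKey p.1, p.1, p.2)) := by
    rw [List.filter_map]; rfl
  rw [hfilter, List.foldl_map]
  rfl
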